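-- pv_equiv track=rewrite | github.com/AdrewOtr/FootballCoordinates | FootballCoordinates.py | create_players_coordinates
-- ===== SOURCE A (Python) =====
-- def create_players_coordinates(table):
--     item_name = 2
--     item_x = 5
--     item_y = 6
--
--     out_array = []
--     players_id = dict()
--
--     for index in range(1, len(table)):
--         row = table[index]
--
--         if row[item_name] in players_id:  # if player id was already added
--             arr_index = players_id[row[item_name]]
--             out_array[arr_index][0].append(int(row[item_x]))
--             out_array[arr_index][1].append(int(row[item_y]))
--         else:  # if player it is first player id
--             out_array.append([[int(row[item_x])], [int(row[item_y])]])
--             players_id[row[item_name]] = len(out_array) - 1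
--
--     return out_array, players_id
-- ===== SOURCE B (Python) =====
-- def create_players_coordinates(table):
--     rows = table[1:]
--     # first pass: distinct player names in first-appearance order
--     names = list(dict.fromkeys(row[2] for row in rows))
--     # per-name passes: collect that player's coordinates by filtering the rows
--     out_array = [
--         [[int(row[5]) for row in rows if row[2] == name],
--          [int(row[6]) for row in rows if row[2] == name]]
--         for name in names
--     ]
--     players_id = {name: i for i, name in enumerate(names)}
--     return out_array, players_id
-- ===== Notes on version B (the rewrite author's own statement) =====
-- stated objective: alternative
-- what changed: A builds the grouped output incrementally in one pass, branching per row between appending a new cell and indexing back into the partial result via a name-to-index dict; B never builds anything incrementally: it first computes the distinct names in first-appearance order (dict.fromkeys), then for each name re-scans the rows with a filter to collect that player's x and y lists, trading the single stateful pass for stateless nested scans.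
import Mathlib
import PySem

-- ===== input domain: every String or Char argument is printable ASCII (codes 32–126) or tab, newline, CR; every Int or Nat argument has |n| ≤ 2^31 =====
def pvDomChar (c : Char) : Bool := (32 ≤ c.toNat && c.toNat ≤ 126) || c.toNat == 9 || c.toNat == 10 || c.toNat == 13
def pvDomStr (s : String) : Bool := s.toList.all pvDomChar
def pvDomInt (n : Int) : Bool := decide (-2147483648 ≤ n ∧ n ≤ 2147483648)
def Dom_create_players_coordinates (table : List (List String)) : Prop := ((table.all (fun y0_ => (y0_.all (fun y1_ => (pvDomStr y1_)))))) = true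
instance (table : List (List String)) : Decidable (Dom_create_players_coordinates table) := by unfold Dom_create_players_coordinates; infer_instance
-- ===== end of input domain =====

-- B replaces A's single stateful pass (result list grown in place, steered by a name→index
-- dict and an if/else) by stateless staged scans: dedup the names first, then filter the
-- rows once per name (objective: alternative — same results via nested scans, no shared state).
-- Return-value equivalence only; neither version mutates its argument.

-- ===== PORT A =====
-- one iteration of A's 'for index in range(1, len(table))' loop body
def pvAstep (s : List (List (List Int)) × PySem.Dict String Int) (row : List String) :
    List (List (List Int)) × PySem.Dict String Int :=
  let name := PySem.List.pyGetD row 2 ""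
  let x := (PySem.Int.ofStr? (PySem.List.pyGetD row 5 "")).getD 0
  let y := (PySem.Int.ofStr? (PySem.List.pyGetD row 6 "")).getD 0
  if s.2.contains name then
    let arrIndex := s.2.getD name 0
    (s.1.modify arrIndex.toNat
       (fun cell => (cell.modify 0 (· ++ [x])).modify 1 (· ++ [y])), s.2)
  else
    (s.1 ++ [[[x], [y]]], s.2.insert name (s.1.length : Int))

def create_players_coordinates (table : List (List String)) :
    List (List (List Int)) × (List (String × Int)) :=
  let s := (table.drop 1).foldl pvAstep ([], PySem.Dict.empty)
  (s.1, s.2.items)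

-- ===== PORT B =====
def create_players_coordinates_alt (table : List (List String)) :
    List (List (List Int)) × (List (String × Int)) :=
  let rows := table.drop 1
  -- names = list(dict.fromkeys(row[2] for row in rows))
  let names := PySem.List.dedup (rows.map (fun row => PySem.List.pyGetD row 2 ""))
  -- out_array: for each name, filter the rows and convert column 5 resp. 6
  (names.map (fun name =>
     [(rows.filter (fun row => PySem.List.pyGetD row 2 "" == name)).map
        (fun row => (PySem.Int.ofStr? (PySem.List.pyGetD row 5 "")).getD 0),
      (rows.filter (fun row => PySem.List.pyGetD row 2 "" == name)).map
        (fun row => (PySem.Int.ofStr? (PySem.List.pyGetD row 6 "")).getD 0)]),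
   -- players_id = {name: i for i, name in enumerate(names)}
   names.zipIdx.map (fun p => (p.1, (p.2 : Int))))

-- ===== PRECONDITION & SPEC =====
-- Pre_ excludes exactly the inputs where Python A raises: a data row (table[1:]) shorter
-- than 7 entries (IndexError) or whose column 5 or 6 is not int()-parsable (ValueError).
def Pre_create_players_coordinates (table : List (List String)) : Prop :=
  ∀ row ∈ table.drop 1, 7 ≤ row.length ∧
    (PySem.Int.ofStr? (PySem.List.pyGetD row 5 "")).isSome = true ∧
    (PySem.Int.ofStr? (PySem.List.pyGetD row 6 "")).isSome = true
instance (table : List (List String)) : Decidable (Pre_create_players_coordinates table) := by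
  unfold Pre_create_players_coordinates; infer_instance

def pvWitness_create_players_coordinates : List (List String) :=
  [["h", "h", "name", "h", "h", "x", "y"],
   ["", "", "bob", "", "", "3", "-4"],
   ["", "", "amy", "", "", " 7 ", "0"],
   ["", "", "bob", "", "", "+5", "12"]]

def Spec_create_players_coordinates (table : List (List String))
    (out : List (List (List Int)) × (List (String × Int))) : Prop :=
  out = create_players_coordinates_alt table
instance (table : List (List String)) (out : List (List (List Int)) × (List (String × Int))) :
    Decidable (Spec_create_players_coordinates table out) := by
  unfold Spec_create_players_coordinates; infer_instance

-- ===== CLAIM (what is proved, stated in full; the proofs are below) =====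
def Claim_equal_create_players_coordinates : Prop :=
  ∀ (table : List (List String)), Dom_create_players_coordinates table →
    Pre_create_players_coordinates table →
    Spec_create_players_coordinates table (create_players_coordinates table)

-- ===== LEMMAS AND PROOFS =====

-- row projections shared by the closed forms below
def pvName (row : List String) : String := PySem.List.pyGetD row 2 ""
def pvX (row : List String) : Int := (PySem.Int.ofStr? (PySem.List.pyGetD row 5 "")).getD 0
def pvY (row : List String) : Int := (PySem.Int.ofStr? (PySem.List.pyGetD row 6 "")).getD 0

-- B's three stages as closed forms of the processed row list
def pvNames (rows : List (List String)) : List String :=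
  PySem.List.dedup (rows.map pvName)
def pvCell (rows : List (List String)) (nm : String) : List (List Int) :=
  [(rows.filter (fun row => pvName row == nm)).map pvX,
   (rows.filter (fun row => pvName row == nm)).map pvY]
def pvOut (rows : List (List String)) : List (List (List Int)) :=
  (pvNames rows).map (pvCell rows)
def pvPid (rows : List (List String)) : PySem.Dict String Int :=
  PySem.Dict.mk ((pvNames rows).zipIdx.map (fun p => (p.1, (p.2 : Int))))

theorem pv_pid_get (ks : List String) (n : Nat) (name : String) :
    (PySem.Dict.mk ((ks.zipIdx n).map (fun p => (p.1, (p.2 : Int))))).get? name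
      = if name ∈ ks then some ((n + ks.idxOf name : Nat) : Int) else none := by
  induction ks generalizing n with
  | nil => rfl
  | cons k t ih =>
    rw [List.zipIdx_cons]
    simp only [List.map_cons, PySem.Dict.get?_mk_cons, ih]
    by_cases hk : k = name
    · subst hk; simp
    · have hne : (k == name) = false := by simp [hk]
      simp only [hne, List.mem_cons, List.idxOf_cons, cond_false]
      by_cases hm : name ∈ t
      · have hnk : ¬ name = k := fun h => hk h.symm
        simp [hm, hnk]; omega
      · have hnk : ¬ name = k := fun h => hk h.symm
        simp [hm, hnk]

theorem pv_names_append (rows : List (List String)) (row : List String) :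
    pvNames (rows ++ [row]) =
      if pvName row ∈ pvNames rows then pvNames rows else pvNames rows ++ [pvName row] := by
  simp only [pvNames, List.map_append, List.map_cons, List.map_nil,
    PySem.List.dedup_eq_ofList, PySem.Set.ofList_eq_foldl, List.foldl_append,
    List.foldl_cons, List.foldl_nil]
  simp [PySem.Set.add]

theorem pv_mem_names (rows : List (List String)) (nm : String) :
    nm ∈ pvNames rows ↔ nm ∈ rows.map pvName := by
  simp [pvNames]

theorem pv_nodup_names (rows : List (List String)) : (pvNames rows).Nodup :=
  PySem.List.nodup_dedup _

-- a cell of the extended row list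
theorem pv_cell_append (rows : List (List String)) (row : List String) (nm : String) :
    pvCell (rows ++ [row]) nm =
      if pvName row = nm then
        [(rows.filter (fun r => pvName r == nm)).map pvX ++ [pvX row],
         (rows.filter (fun r => pvName r == nm)).map pvY ++ [pvY row]]
      else pvCell rows nm := by
  simp only [pvCell, List.filter_append, List.filter_cons, List.filter_nil]
  by_cases h : pvName row = nm
  · simp [h]
  · have hb : (pvName row == nm) = false := by simp [h]
    simp [hb, h]

-- modifying a mapped list at the index of a (unique) key
theorem pv_map_modify {α : Type} (ks : List String) (k : String) (f : String → α) (h : α → α)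
    (hnd : ks.Nodup) (hm : k ∈ ks) :
    (ks.map f).modify (ks.idxOf k) h
      = ks.map (fun k' => if k' = k then h (f k) else f k') := by
  induction ks with
  | nil => simp at hm
  | cons a t ih =>
    rw [List.nodup_cons] at hnd
    by_cases ha : a = k
    · subst ha
      have ht : t.map (fun k' => if k' = a then h (f a) else f k') = t.map f := by
        apply List.map_congr_left
        intro q hq
        have : ¬ q = a := fun he => hnd.1 (he ▸ hq)
        simp [this]
      simp [List.modify_cons, ht]
    · have hm' : k ∈ t := by
        rcases List.mem_cons.mp hm with h' | h'
        · exact absurd h'.symm ha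
        · exact h'
      have hb : (a == k) = false := by simp [ha]
      simp only [List.map_cons, List.idxOf_cons, hb, cond_false, List.modify_cons,
        Nat.succ_ne_zero, if_false, Nat.add_sub_cancel]
      rw [ih hnd.2 hm']
      simp [ha]

-- one loop step of A preserves the closed-form description
theorem pv_step (rows : List (List String)) (row : List String) :
    pvAstep (pvOut rows, pvPid rows) row = (pvOut (rows ++ [row]), pvPid (rows ++ [row])) := by
  have hget : (pvPid rows).get? (pvName row)
      = if pvName row ∈ pvNames rows
        then some (((pvNames rows).idxOf (pvName row) : Nat) : Int) else none := by
    simpa [pvPid] using pv_pid_get (pvNames rows) 0 (pvName row)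
  by_cases hm : pvName row ∈ pvNames rows
  · -- existing player: names unchanged, one cell extended
    have hc : (pvPid rows).contains (pvName row) = true := by
      rw [PySem.Dict.contains_eq_isSome_get?, hget]; simp [hm]
    have hgetD : (pvPid rows).getD (pvName row) 0
        = (((pvNames rows).idxOf (pvName row) : Nat) : Int) := by
      rw [PySem.Dict.getD_eq_get?_getD, hget]; simp [hm]
    have hnames : pvNames (rows ++ [row]) = pvNames rows := by
      rw [pv_names_append]; simp [hm]
    have hA : pvAstep (pvOut rows, pvPid rows) row
        = if (pvPid rows).contains (pvName row) then
            ((pvOut rows).modify ((pvPid rows).getD (pvName row) 0).toNat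
               (fun cell => (cell.modify 0 (· ++ [pvX row])).modify 1 (· ++ [pvY row])),
             pvPid rows)
          else (pvOut rows ++ [[[pvX row], [pvY row]]],
                (pvPid rows).insert (pvName row) ((pvOut rows).length : Int)) := rfl
    rw [hA, if_pos hc]
    refine Prod.ext ?_ ?_
    · show (pvOut rows).modify ((pvPid rows).getD (pvName row) 0).toNat
          (fun cell => (cell.modify 0 (· ++ [pvX row])).modify 1 (· ++ [pvY row]))
        = pvOut (rows ++ [row])
      rw [hgetD, Int.toNat_natCast]
      unfold pvOut
      rw [pv_map_modify _ _ _ _ (pv_nodup_names rows) hm, hnames]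
      apply List.map_congr_left
      intro nm hnm
      rw [pv_cell_append]
      by_cases he : nm = pvName row
      · subst he
        simp [pvCell, List.modify_cons]
      · have : ¬ pvName row = nm := fun h => he h.symm
        simp [he, this]
    · show pvPid rows = pvPid (rows ++ [row])
      simp [pvPid, hnames]
  · -- new player: a cell and a dict entry appended
    have hc : (pvPid rows).contains (pvName row) = false := by
      rw [PySem.Dict.contains_eq_isSome_get?, hget]; simp [hm]
    have hnames : pvNames (rows ++ [row]) = pvNames rows ++ [pvName row] := by
      rw [pv_names_append]; simp [hm]
    have hfresh : rows.filter (fun r => pvName r == pvName row) = [] := by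
      rw [List.filter_eq_nil_iff]
      intro r hr hb
      exact hm ((pv_mem_names rows (pvName row)).mpr
        (by rw [← eq_of_beq hb]; exact List.mem_map_of_mem hr))
    have hA : pvAstep (pvOut rows, pvPid rows) row
        = if (pvPid rows).contains (pvName row) then
            ((pvOut rows).modify ((pvPid rows).getD (pvName row) 0).toNat
               (fun cell => (cell.modify 0 (· ++ [pvX row])).modify 1 (· ++ [pvY row])),
             pvPid rows)
          else (pvOut rows ++ [[[pvX row], [pvY row]]],
                (pvPid rows).insert (pvName row) ((pvOut rows).length : Int)) := rfl
    rw [hA, if_neg (by simp [hc])]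
    refine Prod.ext ?_ ?_
    · show pvOut rows ++ [[[pvX row], [pvY row]]] = pvOut (rows ++ [row])
      unfold pvOut
      rw [hnames, List.map_append, List.map_cons, List.map_nil]
      congr 1
      · apply List.map_congr_left
        intro nm hnm
        rw [pv_cell_append]
        have : ¬ pvName row = nm := by
          intro h; exact hm (h ▸ hnm)
        simp [this, pvCell]
      · rw [pv_cell_append]
        simp [hfresh]
    · show (pvPid rows).insert (pvName row) ((pvOut rows).length : Int) = pvPid (rows ++ [row])
      apply PySem.Dict.ext
      rw [PySem.Dict.items_insert_of_not_contains _ _ hc]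
      have hlen : (pvOut rows).length = (pvNames rows).length := by
        simp [pvOut]
      show (pvNames rows).zipIdx.map (fun p => (p.1, (p.2 : Int)))
          ++ [(pvName row, ((pvOut rows).length : Int))]
        = (pvNames (rows ++ [row])).zipIdx.map (fun p => (p.1, (p.2 : Int)))
      rw [hnames, List.zipIdx_append, List.map_append, hlen]
      simp

theorem pv_loop (l rows : List (List String)) :
    l.foldl pvAstep (pvOut rows, pvPid rows) = (pvOut (rows ++ l), pvPid (rows ++ l)) := by
  induction l generalizing rows with
  | nil => simp
  | cons r t ih =>
    rw [List.foldl_cons, pv_step rows r, ih (rows ++ [r])]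
    simp

-- ===== VERDICT (by name: the statement is the Claim_ definition above) =====
theorem create_players_coordinates_spec : Claim_equal_create_players_coordinates := by
  intro table _ _
  unfold Spec_create_players_coordinates create_players_coordinates create_players_coordinates_alt
  have h0 : (([], PySem.Dict.empty) : List (List (List Int)) × PySem.Dict String Int)
      = (pvOut [], pvPid []) := rfl
  rw [h0, pv_loop (table.drop 1) []]
  simp only [List.nil_append]
  rfl
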